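-- pv_equiv track=rewrite | github.com/naa/FreeFermionsLimitShapes | azteclozenge.py | reverse_pattern
-- ===== SOURCE A (Python) =====
-- def reverse_pattern(pat,n,k):
--     rpat=list(reversed(pat))
--     r=[]
--     for i in range(n):
--         r.append([])
--         for j in range(i+1):
--             r[i].append(k-rpat[i][i-j])
--     return list(reversed(r))
-- ===== SOURCE B (Python) =====
-- def reverse_pattern(pat, n, k):
--     def build(rows, width):
--         if width <= 0:
--             return []
--         head = [k - x for x in reversed(rows[0][:width])]
--         return [head] + build(rows[1:], width - 1)
--     return build(pat[len(pat) - n:], n)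
-- ===== Notes on version B (the rewrite author's own statement) =====
-- stated objective: simpler
-- what changed: B drops A's reverse-input / append-loops / reverse-output pipeline for a recursive peel: it slices off the last n rows once and then recursively emits, per step, the reversed k-complemented prefix rows[0][:width] while shrinking width, so no index arithmetic and no post-hoc reversal occur.
import Mathlib
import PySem

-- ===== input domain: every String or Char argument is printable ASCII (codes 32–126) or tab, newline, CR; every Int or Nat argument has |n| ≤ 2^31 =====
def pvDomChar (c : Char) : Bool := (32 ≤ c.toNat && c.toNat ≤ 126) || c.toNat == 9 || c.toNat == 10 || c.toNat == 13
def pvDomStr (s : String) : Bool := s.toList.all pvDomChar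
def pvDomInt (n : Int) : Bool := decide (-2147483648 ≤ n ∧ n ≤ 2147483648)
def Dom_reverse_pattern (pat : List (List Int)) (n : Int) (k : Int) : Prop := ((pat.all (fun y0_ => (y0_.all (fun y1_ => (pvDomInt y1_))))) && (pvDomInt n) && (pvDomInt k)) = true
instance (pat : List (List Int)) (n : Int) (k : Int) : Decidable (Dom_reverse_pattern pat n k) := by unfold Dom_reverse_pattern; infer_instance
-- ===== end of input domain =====

-- B replaces A's reverse->append-loops->reverse pipeline by a recursive peel:
-- slice off the last n rows once, then recursively emit one row per step as the
-- reversed k-complemented prefix of the current first row (objective: simpler).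


-- ===== PORT A =====
def reverse_pattern (pat : List (List Int)) (n : Int) (k : Int) : List (List Int) :=
  let rpat := pat.reverse
  let r := (PySem.List.pyRange 0 n 1).foldl (fun r i =>
    r ++ [(PySem.List.pyRange 0 (i + 1) 1).foldl (fun row j =>
      row ++ [k - PySem.List.pyGetD (PySem.List.pyGetD rpat i []) (i - j) 0]) []]) []
  r.reverse

-- ===== PORT B =====
-- build(rows, width): emit [k - x for x in reversed(rows[0][:width])], recurse on rows[1:], width-1.
-- The 'rows = []' arm is where the Python raises IndexError (outside Pre_).
def buildB (k : Int) : List (List Int) → Int → List (List Int)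
  | rows, width =>
    if width ≤ 0 then []
    else
      match rows with
      | [] => []
      | r :: rest =>
        ((PySem.List.slice r none (some width)).reverse.map (fun x => k - x)) :: buildB k rest (width - 1)

def reverse_pattern_alt (pat : List (List Int)) (n : Int) (k : Int) : List (List Int) :=
  buildB k (PySem.List.slice pat (some ((pat.length : Int) - n)) none) n

-- ===== PRECONDITION & SPEC =====
-- Pre_ excludes exactly the inputs where A raises IndexError: n exceeding len(pat),
-- or some of the last n rows of pat being too short for the triangular read.
def Pre_reverse_pattern (pat : List (List Int)) (n : Int) (k : Int) : Prop :=
  n ≤ (pat.length : Int) ∧ ∀ i : Nat, i < n.toNat → i + 1 ≤ (pat.reverse.getD i []).length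
instance (pat : List (List Int)) (n : Int) (k : Int) : Decidable (Pre_reverse_pattern pat n k) := by unfold Pre_reverse_pattern; infer_instance

def pvWitness_reverse_pattern : List (List Int) × Int × Int := ([[1, 2, 3], [4, 5], [6]], 3, 10)

def Spec_reverse_pattern (pat : List (List Int)) (n : Int) (k : Int) (out : List (List Int)) : Prop := out = reverse_pattern_alt pat n k
instance (pat : List (List Int)) (n : Int) (k : Int) (out : List (List Int)) : Decidable (Spec_reverse_pattern pat n k out) := by unfold Spec_reverse_pattern; infer_instance

-- ===== CLAIM (what is proved, stated in full; the proofs are below) =====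
def Claim_equal_reverse_pattern : Prop := ∀ (pat : List (List Int)) (n : Int) (k : Int), Dom_reverse_pattern pat n k → Pre_reverse_pattern pat n k → Spec_reverse_pattern pat n k (reverse_pattern pat n k)

-- ===== LEMMAS AND PROOFS =====

-- Characterisation of B's recursion: with enough rows, build is a map over row indices.
theorem buildB_eq (k : Int) (w : Nat) (rows : List (List Int)) (hw : w ≤ rows.length) :
    buildB k rows (w : Int)
      = (List.range w).map (fun m =>
          ((rows.getD m []).take (w - m)).reverse.map (fun x => k - x)) := by
  induction w generalizing rows with
  | zero => rw [buildB.eq_def]; simp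
  | succ w ih =>
    cases rows with
    | nil => simp at hw
    | cons r rest =>
      rw [buildB.eq_def]
      have h0 : ¬ ((w + 1 : Nat) : Int) ≤ 0 := by omega
      simp only [h0, if_false]
      have hsl : PySem.List.slice r none (some ((w + 1 : Nat) : Int)) = r.take (w + 1) := by
        rw [PySem.List.slice_to _ (by omega)]
        norm_num
      have hrec : ((w + 1 : Nat) : Int) - 1 = (w : Int) := by omega
      rw [hsl, hrec, ih rest (by simpa using hw)]
      rw [List.range_succ_eq_map]
      simp [Function.comp, Nat.succ_sub_succ]

-- The main equivalence on Pre_.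
theorem reverse_pattern_eq_alt (pat : List (List Int)) (n k : Int)
    (h1 : n ≤ (pat.length : Int))
    (h2 : ∀ i : Nat, i < n.toNat → i + 1 ≤ (pat.reverse.getD i []).length) :
    reverse_pattern pat n k = reverse_pattern_alt pat n k := by
  unfold reverse_pattern reverse_pattern_alt
  by_cases hn : n ≤ 0
  · have hA : PySem.List.pyRange 0 n 1 = [] := by
      apply List.eq_nil_of_length_eq_zero
      rw [PySem.List.length_pyRange_one]
      omega
    rw [buildB.eq_def]
    simp [hA, hn]
  · push_neg at hn
    set N := n.toNat with hN
    have hnN : n = (N : Int) := by omega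
    -- B side: the outer slice is pat.drop (pat.length - N), of length N
    have hrows : PySem.List.slice pat (some ((pat.length : Int) - n)) none
        = pat.drop (pat.length - N) := by
      rw [PySem.List.slice_from _ (by omega)]
      congr 1
      omega
    rw [hrows, hnN, buildB_eq k N _ (by simp; omega)]
    -- A side: foldl → map, then compare elementwise
    simp only [PySem.List.foldl_append_singleton_eq_map, List.nil_append]
    apply List.ext_getElem
    · simp [PySem.List.length_pyRange_one]
    intro m hm hm'
    simp only [List.length_reverse, List.length_map, PySem.List.length_pyRange_one] at hm
    have hmN : m < N := by omega
    rw [List.getElem_reverse]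
    simp only [List.length_map, PySem.List.length_pyRange_one, List.getElem_map,
      PySem.List.getElem_pyRange_one, List.getElem_range]
    -- the outer index of A corresponding to output row m is i = N - 1 - m
    have hidx : (0 : Int) + ↑((((N : Int)) - 0).toNat - 1 - m) = ((N - 1 - m : Nat) : Int) := by omega
    rw [hidx]
    -- identify A's row with B's row
    have hrowlt : pat.length - N + m < pat.length := by omega
    have hrow : PySem.List.pyGetD pat.reverse ((N - 1 - m : Nat) : Int) ([] : List Int)
        = pat[pat.length - N + m] := by
      rw [PySem.List.pyGetD_eq_getElem _ _ (by omega) (by simp; omega)]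
      rw [List.getElem_reverse]
      congr 1
      omega
    have hlen : N - m ≤ (pat[pat.length - N + m]).length := by
      have := h2 (N - 1 - m) (by omega)
      have hg : pat.reverse.getD (N - 1 - m) [] = pat[pat.length - N + m] := by
        rw [List.getD_eq_getElem _ _ (by simp; omega), List.getElem_reverse]
        congr 1
        omega
      rw [hg] at this
      omega
    have hgd : (pat.drop (pat.length - N)).getD m [] = pat[pat.length - N + m] := by
      rw [List.getD_eq_getElem _ _ (by simp; omega), List.getElem_drop]
    rw [hrow, hgd]
    -- now compare the two rows elementwise
    set row := pat[pat.length - N + m] with hrowdef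
    apply List.ext_getElem
    · simp [PySem.List.length_pyRange_one]
      omega
    intro j hj hj'
    simp only [List.length_map, PySem.List.length_pyRange_one] at hj
    have hjlt : j < N - m := by omega
    simp only [List.getElem_map, PySem.List.getElem_pyRange_one]
    rw [List.getElem_reverse]
    simp only [List.length_take, List.getElem_take]
    have hjj : (0 : Int) + (j : Int) = (j : Int) := by omega
    rw [hjj]
    have hsub : ((N - 1 - m : Nat) : Int) - (j : Int) = ((N - 1 - m - j : Nat) : Int) := by omega
    rw [hsub, PySem.List.pyGetD_eq_getElem _ _ (by omega) (by simp; omega)]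
    congr 2
    · omega

-- ===== VERDICT (by name: the statement is the Claim_ definition above) =====
theorem reverse_pattern_spec : Claim_equal_reverse_pattern := by
  intro pat n k _ hpre
  unfold Spec_reverse_pattern
  exact reverse_pattern_eq_alt pat n k hpre.1 hpre.2
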